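-- pv_equiv track=rewrite | github.com/MrBrantCode/unitest_baseline | mut_generate/mist_train_cf/cf_56092/solution.py | text_converter
-- ===== SOURCE A (Python) =====
-- def text_converter(text, case='lower'):
--     snake_text = ''
--     for letter in text:
--         if letter.isupper():
--             snake_text += '_' + letter
--         elif letter.isnumeric():
--             if snake_text and not snake_text[-1].isnumeric():
--                 snake_text += '_'
--             snake_text += letter
--         else:
--             snake_text += letter
--     snake_text = snake_text.strip('_')
--     if case == 'lower':
--         return snake_text.lower()
--     elif case == 'upper':
--         return snake_text.upper()
--     elif case == 'camel':
--         words = snake_text.split('_')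
--         return words[0].lower() + ''.join(word.title() for word in words[1:])
-- ===== SOURCE B (Python) =====
-- def text_converter(text, case='lower'):
--     # one pass builds the list of word segments; result is computed from the list
--     words = []
--     cur = ''
--     prev = ''
--     for c in text:
--         if c == '_':
--             words.append(cur)
--             cur = ''
--         elif c.isupper():
--             words.append(cur)
--             cur = c
--         elif c.isnumeric() and prev and not prev.isnumeric():
--             words.append(cur)
--             cur = c
--         else:
--             cur += c
--         prev = c
--     words.append(cur)
--     while words and words[0] == '':
--         words.pop(0)
--     while words and words[-1] == '':
--         words.pop()
--     if case == 'lower':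
--         return '_'.join(words).lower()
--     if case == 'upper':
--         return '_'.join(words).upper()
--     if case == 'camel':
--         if not words:
--             return ''
--         return words[0].lower() + ''.join(w.title() for w in words[1:])
-- ===== Notes on version B (the rewrite author's own statement) =====
-- stated objective: alternative
-- what changed: B builds an explicit list of word segments in one pass (splitting at uppercase letters, numeric-run starts and literal underscores, then trimming empty edge segments) and derives each case's output directly from the word list, instead of A's sentinel-underscore string that is stripped and re-split.
import Mathlib
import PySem

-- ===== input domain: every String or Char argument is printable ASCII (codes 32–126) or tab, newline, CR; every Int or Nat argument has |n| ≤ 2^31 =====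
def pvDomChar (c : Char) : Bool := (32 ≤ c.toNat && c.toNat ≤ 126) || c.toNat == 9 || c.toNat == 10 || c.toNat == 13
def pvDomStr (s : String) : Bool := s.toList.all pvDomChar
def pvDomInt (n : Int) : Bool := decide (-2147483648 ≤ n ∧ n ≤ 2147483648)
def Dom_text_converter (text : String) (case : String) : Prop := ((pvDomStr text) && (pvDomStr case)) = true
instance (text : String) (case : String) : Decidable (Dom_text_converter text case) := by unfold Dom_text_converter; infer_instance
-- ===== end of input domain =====

-- B builds an explicit word-segment list in one pass and derives each case's output from it,
-- instead of A's underscore-sentinel string that is stripped and re-split (alternative decomposition, same cost).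


-- ===== PORT A =====
-- hand port of str.title() (not in PySem), exact on the ASCII domain: a cased (here: ASCII letter)
-- character is uppercased after a non-cased character and lowercased after a cased one
def pyTitle (s : List Char) : List Char :=
  (s.foldl (fun (acc : List Char × Bool) c =>
    if PySem.Chars.isalpha c then
      (acc.1 ++ [if acc.2 then PySem.Chars.lowerChar c else PySem.Chars.upperChar c], true)
    else (acc.1 ++ [c], false)) ([], false)).1

-- loop body of A ('.isnumeric' ported as isdigit: identical on the ASCII domain)
def tcStepA (st : List Char) (c : Char) : List Char :=
  if PySem.Chars.isupper c then st ++ ['_', c]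
  else if PySem.Chars.isdigit c then
    if !st.isEmpty && !((PySem.List.pyGet? st (-1)).any PySem.Chars.isdigit) then st ++ ['_', c]
    else st ++ [c]
  else st ++ [c]

def text_converter (text : String) (case : String) : Option String :=
  let snake := text.toList.foldl tcStepA []
  let snake2 := PySem.Chars.stripChars snake ['_']
  if case = "lower" then some (String.ofList (PySem.Chars.lower snake2))
  else if case = "upper" then some (String.ofList (PySem.Chars.upper snake2))
  else if case = "camel" then
    let words := PySem.Chars.splitOn snake2 ['_']
    some (String.ofList (PySem.Chars.lower (words.headD []) ++
      PySem.Chars.join [] ((words.drop 1).map pyTitle)))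
  else none

-- ===== PORT B =====
-- loop body of B: state = (finished words, current segment, previous char)
def tcStepB (st : List (List Char) × List Char × Option Char) (c : Char) :
    List (List Char) × List Char × Option Char :=
  if c = '_' then (st.1 ++ [st.2.1], [], some c)
  else if PySem.Chars.isupper c then (st.1 ++ [st.2.1], [c], some c)
  else if PySem.Chars.isdigit c && st.2.2.any (fun p => !PySem.Chars.isdigit p) then
    (st.1 ++ [st.2.1], [c], some c)
  else (st.1, st.2.1 ++ [c], some c)

-- the two trimming while-pop loops of B: drop empty segments at both ends
def tcTrim (ws : List (List Char)) : List (List Char) :=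
  ((ws.dropWhile List.isEmpty).reverse.dropWhile List.isEmpty).reverse

def text_converter_alt (text : String) (case : String) : Option String :=
  let fin := text.toList.foldl tcStepB ([], [], none)
  let ws := tcTrim (fin.1 ++ [fin.2.1])
  if case = "lower" then some (String.ofList (PySem.Chars.lower (PySem.Chars.join ['_'] ws)))
  else if case = "upper" then some (String.ofList (PySem.Chars.upper (PySem.Chars.join ['_'] ws)))
  else if case = "camel" then
    match ws with
    | [] => some ""
    | w :: rest => some (String.ofList (PySem.Chars.lower w ++ PySem.Chars.join [] (rest.map pyTitle)))
  else none

-- ===== PRECONDITION & SPEC =====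
def Spec_text_converter (text : String) (case : String) (out : Option String) : Prop := out = text_converter_alt text case
instance (text : String) (case : String) (out : Option String) : Decidable (Spec_text_converter text case out) := by unfold Spec_text_converter; infer_instance

-- ===== CLAIM (what is proved, stated in full; the proofs are below) =====
def Claim_equal_text_converter : Prop := ∀ (text : String) (case : String), Dom_text_converter text case → Spec_text_converter text case (text_converter text case)

-- ===== LEMMAS AND PROOFS =====

lemma join_eq (sep : List Char) (ws : List (List Char)) :
    PySem.Chars.join sep ws = List.intercalate sep ws := rfl

lemma ic_nil : List.intercalate ['_'] ([] : List (List Char)) = [] := by simp [List.intercalate]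

lemma ic_single (x : List Char) : List.intercalate ['_'] [x] = x := by simp [List.intercalate]

lemma ic_cons (x y : List Char) (t : List (List Char)) :
    List.intercalate ['_'] (x :: y :: t) = x ++ '_' :: List.intercalate ['_'] (y :: t) := by
  simp [List.intercalate]

lemma intercalate_snoc (ws : List (List Char)) (w : List Char) (h : ws ≠ []) :
    List.intercalate ['_'] (ws ++ [w]) = List.intercalate ['_'] ws ++ '_' :: w := by
  induction ws with
  | nil => simp at h
  | cons x rest ih =>
    cases rest with
    | nil => simp [ic_cons, ic_single]
    | cons y t =>
      simp only [List.cons_append] at *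
      rw [ic_cons, ic_cons, ih (by simp)]
      simp

lemma intercalate_snoc_append (ws : List (List Char)) (w : List Char) (c : Char) :
    List.intercalate ['_'] (ws ++ [w]) ++ [c] = List.intercalate ['_'] (ws ++ [w ++ [c]]) := by
  cases ws with
  | nil => simp [ic_single]
  | cons x t => rw [intercalate_snoc _ _ (by simp), intercalate_snoc _ _ (by simp)]; simp

lemma pyGet_neg_one (st : List Char) : PySem.List.pyGet? st (-1) = st.getLast? := by
  cases st with
  | nil => rfl
  | cons a t => simp [PySem.List.pyGet?, PySem.List.pyIdx?, List.getLast?_eq_getElem?]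

lemma condEq (st : List Char) :
    (!st.isEmpty && !(Option.any PySem.Chars.isdigit st.getLast?)) =
      st.getLast?.any (fun p => !PySem.Chars.isdigit p) := by
  cases st with
  | nil => rfl
  | cons a t =>
    obtain ⟨p, hp⟩ := Option.isSome_iff_exists.mp (by simp : (a :: t).getLast?.isSome)
    simp [hp]

lemma revJoin (ws : List (List Char)) :
    (List.intercalate ['_'] ws).reverse = List.intercalate ['_'] ((ws.map List.reverse).reverse) := by
  induction ws with
  | nil => simp [ic_nil]
  | cons x rest ih =>
    cases rest with
    | nil => simp [ic_single]
    | cons y t =>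
      calc (List.intercalate ['_'] (x :: y :: t)).reverse
          = (List.intercalate ['_'] (y :: t)).reverse ++ '_' :: x.reverse := by rw [ic_cons]; simp
        _ = List.intercalate ['_'] (((y :: t).map List.reverse).reverse) ++ '_' :: x.reverse := by rw [ih]
        _ = List.intercalate ['_'] (((y :: t).map List.reverse).reverse ++ [x.reverse]) :=
            (intercalate_snoc _ _ (by simp)).symm
        _ = List.intercalate ['_'] (((x :: y :: t).map List.reverse).reverse) := by simp

lemma dropUnd (ws : List (List Char)) (h : ∀ w ∈ ws, '_' ∉ w) :
    List.dropWhile (· == '_') (List.intercalate ['_'] ws) =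
      List.intercalate ['_'] (ws.dropWhile List.isEmpty) := by
  induction ws with
  | nil => simp [ic_nil]
  | cons w rest ih =>
    cases w with
    | nil =>
      cases rest with
      | nil => simp [ic_single, ic_nil]
      | cons y t =>
        rw [ic_cons]
        rw [show List.dropWhile List.isEmpty ([] :: y :: t) = List.dropWhile List.isEmpty (y :: t) by simp]
        rw [List.nil_append, List.dropWhile_cons_of_pos (by decide)]
        exact ih (fun w hw => h w (by simp [hw]))
    | cons c w' =>
      have hmem := h (c :: w') (by simp)
      simp only [List.mem_cons] at hmem
      have hc : (c == '_') = false := by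
        rw [beq_eq_false_iff_ne]
        intro e; exact hmem (by simp [e])
      cases rest with
      | nil => simp [ic_single, hc]
      | cons y t => rw [ic_cons]; simp [hc, ic_cons]

lemma stripChars_eq (s : List Char) :
    PySem.Chars.stripChars s ['_'] =
      (List.dropWhile (· == '_') (List.dropWhile (· == '_') s).reverse).reverse := by
  unfold PySem.Chars.stripChars
  have hp : (fun c => List.contains ['_'] c) = (· == '_') := by
    funext c; rw [List.contains_eq_any_beq]; simp
  rw [hp]

lemma stripJoin (ws : List (List Char)) (h : ∀ w ∈ ws, '_' ∉ w) :
    PySem.Chars.stripChars (List.intercalate ['_'] ws) ['_'] = List.intercalate ['_'] (tcTrim ws) := by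
  rw [stripChars_eq]
  set A := ws.dropWhile List.isEmpty with hA
  have hA' : ∀ w ∈ A, '_' ∉ w := fun w hw => h w ((List.dropWhile_sublist _).mem hw)
  rw [dropUnd ws h, revJoin]
  rw [show (A.map List.reverse).reverse = A.reverse.map List.reverse from by rw [List.map_reverse]]
  have h2 : List.dropWhile List.isEmpty (A.reverse.map List.reverse)
      = (A.reverse.dropWhile List.isEmpty).map List.reverse := by
    rw [List.dropWhile_map]
    rw [show (List.isEmpty ∘ List.reverse) = (List.isEmpty : List Char → Bool) from by
      funext l; simp]
  have h3 : ∀ w ∈ A.reverse.map List.reverse, '_' ∉ w := by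
    intro w hw
    simp only [List.mem_map, List.mem_reverse] at hw
    obtain ⟨v, hv, rfl⟩ := hw
    simpa using hA' v hv
  rw [dropUnd _ h3, h2, revJoin]
  congr 1
  rw [show ((A.reverse.dropWhile List.isEmpty).map List.reverse).map List.reverse
        = A.reverse.dropWhile List.isEmpty from by
      rw [List.map_map]
      rw [show (List.reverse ∘ List.reverse) = @id (List Char) from by funext l; simp]
      simp]
  rfl

lemma go_nil (n : Nat) (cur : List Char) (acc : List (List Char)) :
    PySem.Chars.splitOn.go ['_'] (n+1) [] cur acc = (cur.reverse :: acc).reverse := rfl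

lemma go_cons (n : Nat) (c : Char) (rest cur : List Char) (acc : List (List Char)) :
    PySem.Chars.splitOn.go ['_'] (n+1) (c :: rest) cur acc =
      if ['_'].isPrefixOf (c :: rest) then PySem.Chars.splitOn.go ['_'] n rest [] (cur.reverse :: acc)
      else PySem.Chars.splitOn.go ['_'] n rest (c :: cur) acc := rfl

lemma splitOnP_go_nil (cur : List Char) :
    List.splitOnP.go (· == '_') [] cur = [cur.reverse] := rfl

lemma splitOnP_go_cons (c : Char) (rest cur : List Char) :
    List.splitOnP.go (· == '_') (c :: rest) cur =
      if c == '_' then cur.reverse :: List.splitOnP.go (· == '_') rest []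
      else List.splitOnP.go (· == '_') rest (c :: cur) := rfl

lemma splitOn_go_spec : ∀ (fuel : Nat) (l cur : List Char) (acc : List (List Char)), l.length < fuel →
    PySem.Chars.splitOn.go ['_'] fuel l cur acc =
      acc.reverse ++ List.splitOnP.go (· == '_') l cur := by
  intro fuel
  induction fuel with
  | zero => intro l cur acc h; omega
  | succ n ih =>
    intro l cur acc h
    cases l with
    | nil => rw [go_nil, splitOnP_go_nil]; simp
    | cons c rest =>
      rw [go_cons, splitOnP_go_cons]
      by_cases hc : c = '_'
      · subst hc
        rw [if_pos (by simp [List.isPrefixOf]), if_pos (by simp)]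
        rw [ih _ _ _ (by simpa using Nat.lt_of_succ_lt_succ h)]
        simp
      · rw [if_neg (by simp [List.isPrefixOf]; exact fun e => hc e.symm), if_neg (by simp [hc])]
        exact ih _ _ _ (by simpa using Nat.lt_of_succ_lt_succ h)

lemma chars_splitOn_eq (s : List Char) : PySem.Chars.splitOn s ['_'] = List.splitOn '_' s := by
  unfold PySem.Chars.splitOn
  rw [splitOn_go_spec _ _ _ _ (by omega)]
  rfl

lemma splitJoin (ws : List (List Char)) (hne : ws ≠ []) (h : ∀ w ∈ ws, '_' ∉ w) :
    PySem.Chars.splitOn (List.intercalate ['_'] ws) ['_'] = ws := by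
  rw [chars_splitOn_eq]
  exact List.splitOn_intercalate ws '_' h hne

lemma mem_tcTrim {w : List Char} {ws : List (List Char)} (h : w ∈ tcTrim ws) : w ∈ ws := by
  unfold tcTrim at h
  rw [List.mem_reverse] at h
  have h1 := (List.dropWhile_sublist List.isEmpty).mem h
  rw [List.mem_reverse] at h1
  exact (List.dropWhile_sublist List.isEmpty).mem h1

lemma tc_step (words : List (List Char)) (cur : List Char) (prev : Option Char) (c : Char)
    (h1 : ∀ w ∈ words ++ [cur], '_' ∉ w)
    (h2 : (List.intercalate ['_'] (words ++ [cur])).getLast? = prev) :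
    tcStepA (List.intercalate ['_'] (words ++ [cur])) c =
      List.intercalate ['_'] ((tcStepB (words, cur, prev) c).1 ++ [(tcStepB (words, cur, prev) c).2.1])
    ∧ (tcStepB (words, cur, prev) c).2.2 = some c
    ∧ (tcStepA (List.intercalate ['_'] (words ++ [cur])) c).getLast? = some c
    ∧ ∀ w ∈ (tcStepB (words, cur, prev) c).1 ++ [(tcStepB (words, cur, prev) c).2.1], '_' ∉ w := by
  set st := List.intercalate ['_'] (words ++ [cur]) with hst
  have hne : words ++ [cur] ≠ [] := by simp
  have hfree0 : ∀ w ∈ words ++ [cur] ++ [[]], '_' ∉ w := by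
    intro w hw
    rcases List.mem_append.mp hw with hw | hw
    · exact h1 w hw
    · simp at hw; simp [hw]
  by_cases hu : c = '_'
  · subst hu
    rw [show tcStepB (words, cur, prev) '_' = (words ++ [cur], [], some '_') from by
      simp [tcStepB]]
    rw [show tcStepA st '_' = st ++ ['_'] from by
      simp [tcStepA, (by decide : PySem.Chars.isupper '_' = false),
        (by decide : PySem.Chars.isdigit '_' = false)]]
    refine ⟨?_, rfl, ?_, hfree0⟩
    · rw [hst, intercalate_snoc _ _ hne]
    · exact List.getLast?_concat
  · have hnewfree : ∀ w ∈ words ++ [cur] ++ [[c]], '_' ∉ w := by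
      intro w hw
      rcases List.mem_append.mp hw with hw | hw
      · exact h1 w hw
      · simp at hw
        simp [hw]
        exact fun e => hu e.symm
    have hcurfree : ∀ w ∈ words ++ [cur ++ [c]], '_' ∉ w := by
      intro w hw
      rcases List.mem_append.mp hw with hw | hw
      · exact h1 w (by simp [hw])
      · simp at hw
        subst hw
        intro hm
        rcases List.mem_append.mp hm with hm | hm
        · exact h1 cur (by simp) hm
        · simp at hm
          exact hu hm.symm
    have hjoin_new : st ++ ['_', c] = List.intercalate ['_'] ((words ++ [cur]) ++ [[c]]) := by
      rw [intercalate_snoc _ _ hne]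
    have hlast_new : (st ++ ['_', c]).getLast? = some c := by
      rw [show st ++ ['_', c] = (st ++ ['_']) ++ [c] from by simp]
      exact List.getLast?_concat
    have hjoin_cur : st ++ [c] = List.intercalate ['_'] (words ++ [cur ++ [c]]) := by
      rw [hst, intercalate_snoc_append]
    by_cases hup : PySem.Chars.isupper c = true
    · rw [show tcStepB (words, cur, prev) c = (words ++ [cur], [c], some c) from by
        simp [tcStepB, hu, hup]]
      rw [show tcStepA st c = st ++ ['_', c] from by simp [tcStepA, hup]]
      exact ⟨hjoin_new, rfl, hlast_new, hnewfree⟩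
    · by_cases hd : (PySem.Chars.isdigit c && prev.any (fun p => !PySem.Chars.isdigit p)) = true
      · have hdc : PySem.Chars.isdigit c = true := (Bool.and_eq_true_iff.mp hd).1
        rw [show tcStepB (words, cur, prev) c = (words ++ [cur], [c], some c) from by
          simp only [tcStepB]; rw [if_neg hu, if_neg (by simp [hup]), if_pos hd]]
        rw [show tcStepA st c = st ++ ['_', c] from by
          simp only [tcStepA]
          rw [if_neg (by simp [hup]), if_pos (by simp [hdc]),
            if_pos (by rw [pyGet_neg_one, condEq, h2]; exact (Bool.and_eq_true_iff.mp hd).2)]]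
        exact ⟨hjoin_new, rfl, hlast_new, hnewfree⟩
      · rw [show tcStepB (words, cur, prev) c = (words, cur ++ [c], some c) from by
          simp only [tcStepB]; rw [if_neg hu, if_neg (by simp [hup]), if_neg hd]]
        have hA : tcStepA st c = st ++ [c] := by
          simp only [tcStepA]
          rw [if_neg (by simp [hup])]
          by_cases hdc : PySem.Chars.isdigit c = true
          · rw [if_pos (by simp [hdc]),
              if_neg (by rw [pyGet_neg_one, condEq, h2]
                         intro hb
                         exact hd (by simp [hdc, hb]))]
          · rw [if_neg (by simp [hdc])]
        rw [hA]
        exact ⟨hjoin_cur, rfl, by rw [List.getLast?_concat], hcurfree⟩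

lemma tc_inv (l : List Char) : ∀ (words : List (List Char)) (cur : List Char) (prev : Option Char),
    (∀ w ∈ words ++ [cur], '_' ∉ w) →
    (List.intercalate ['_'] (words ++ [cur])).getLast? = prev →
    l.foldl tcStepA (List.intercalate ['_'] (words ++ [cur])) =
      List.intercalate ['_'] ((l.foldl tcStepB (words, cur, prev)).1 ++ [(l.foldl tcStepB (words, cur, prev)).2.1])
    ∧ ∀ w ∈ (l.foldl tcStepB (words, cur, prev)).1 ++ [(l.foldl tcStepB (words, cur, prev)).2.1], '_' ∉ w := by
  induction l with
  | nil => intro words cur prev h1 h2; exact ⟨rfl, h1⟩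
  | cons c t ih =>
    intro words cur prev h1 h2
    obtain ⟨hj, hp, hl, hf⟩ := tc_step words cur prev c h1 h2
    simp only [List.foldl_cons]
    rw [show tcStepB (words, cur, prev) c
        = ((tcStepB (words, cur, prev) c).1, (tcStepB (words, cur, prev) c).2.1, (tcStepB (words, cur, prev) c).2.2) from rfl]
    rw [hj] at hl ⊢
    rw [hp]
    exact ih _ _ _ hf hl

-- ===== VERDICT (by name: the statement is the Claim_ definition above) =====
theorem text_converter_spec : Claim_equal_text_converter := by
  intro text case _
  unfold Spec_text_converter text_converter text_converter_alt
  obtain ⟨hj, hf⟩ := tc_inv text.toList [] [] none (by simp)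
    (by rw [show List.intercalate ['_'] ([] ++ [[]]) = [] from by simp [ic_single]]; rfl)
  rw [show List.intercalate ['_'] ([] ++ [[]]) = [] from by simp [ic_single]] at hj
  by_cases h1 : case = "lower"
  · simp only [h1, String.reduceEq, reduceIte]
    rw [hj, stripJoin _ hf, join_eq]
  by_cases h2 : case = "upper"
  · simp only [h2, String.reduceEq, reduceIte]
    rw [hj, stripJoin _ hf, join_eq]
  by_cases h3 : case = "camel"
  · simp only [h3, String.reduceEq, reduceIte]
    rw [hj, stripJoin _ hf]
    cases htr : tcTrim ((List.foldl tcStepB ([], [], none) text.toList).1 ++ [(List.foldl tcStepB ([], [], none) text.toList).2.1]) with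
    | nil => rw [ic_nil]; rfl
    | cons w rest =>
      rw [splitJoin _ (by simp) (fun v hv => hf v (mem_tcTrim (htr ▸ hv)))]
      simp [join_eq]
  · simp [h1, h2, h3]
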